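-- pv_equiv track=rewrite | github.com/fdebrus/nikobus-connect | nikobus_connect/discovery/protocol.py | convert_nikobus_address
-- ===== SOURCE A (Python) =====
-- def convert_nikobus_address(address_string: str) -> str:
--     """Convert a hex address string to a Nikobus address."""
--
--     try:
--         address = int(address_string, 16)
--         if address < 0 or address > 0xFFFFFF:
--             return f"[{address_string}]"
--         nikobus_address = 0
--         for i in range(21):
--             nikobus_address = (nikobus_address << 1) | ((address >> i) & 1)
--         nikobus_address <<= 1
--         button = (address >> 21) & 0x07
--         final_address = nikobus_address + button
--         return f"{final_address:06X}"
--     except ValueError: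
--         return f"[{address_string}]"
-- ===== SOURCE B (Python) =====
-- def _rev8(b: int) -> int:
--     """Reverse the 8 bits of a byte with mask-and-shift swaps."""
--     b = ((b & 0xF0) >> 4) | ((b & 0x0F) << 4)
--     b = ((b & 0xCC) >> 2) | ((b & 0x33) << 2)
--     return ((b & 0xAA) >> 1) | ((b & 0x55) << 1)
--
-- def convert_nikobus_address(address_string: str) -> str:
--     """Convert a hex address string to a Nikobus address."""
--     try:
--         address = int(address_string, 16)
--     except ValueError:
--         return f"[{address_string}]"
--     if address < 0 or address > 0xFFFFFF:
--         return f"[{address_string}]"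
--     low = address & 0x1FFFFF
--     rev24 = (_rev8(low & 0xFF) << 16) + (_rev8((low >> 8) & 0xFF) << 8) + _rev8(low >> 16)
--     final_address = ((rev24 >> 3) << 1) + ((address >> 21) & 0x07)
--     return f"{final_address:06X}"
-- ===== Notes on version B (the rewrite author's own statement) =====
-- stated objective: alternative
-- what changed: A reverses the 21 address bits with a 21-iteration shift-accumulate loop; B reverses them loop-free by byte-wise mask-and-shift butterfly swaps (reverse each of the three bytes of the masked value, reassemble, shift right by 3), keeping the parse, range guard, button extraction and hex formatting.
import Mathlib
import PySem

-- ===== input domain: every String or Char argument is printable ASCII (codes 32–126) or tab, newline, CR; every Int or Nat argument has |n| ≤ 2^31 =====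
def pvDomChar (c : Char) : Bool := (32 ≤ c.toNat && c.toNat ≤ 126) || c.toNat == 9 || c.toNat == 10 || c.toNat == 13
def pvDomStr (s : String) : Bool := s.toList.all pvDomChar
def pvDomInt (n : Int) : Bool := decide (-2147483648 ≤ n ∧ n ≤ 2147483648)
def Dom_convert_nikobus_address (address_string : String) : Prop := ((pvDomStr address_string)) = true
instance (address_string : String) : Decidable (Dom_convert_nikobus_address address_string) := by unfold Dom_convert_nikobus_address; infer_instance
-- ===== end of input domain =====

-- B replaces A's 21-iteration shift-accumulate bit-reversal loop by a constant number of
-- byte-wise mask-and-shift swaps (butterfly reversal of three bytes, then a 3-bit shift);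
-- objective: alternative (loop-free bit manipulation, same exact results).

-- shared helper: port of the f-string format f"{n:06X}" (exact for 0 ≤ n, the only way both programs use it)
def pyFormat06X (n : Int) : String :=
  let ds := (Nat.toDigits 16 n.toNat).map Char.toUpper
  String.ofList (List.replicate (6 - ds.length) '0' ++ ds)

-- ===== PORT A =====
def convert_nikobus_address (address_string : String) : String :=
  match PySem.Int.ofStrBase? address_string 16 with
  | none => "[" ++ address_string ++ "]"
  | some address =>
    if address < 0 ∨ address > 0xFFFFFF then "[" ++ address_string ++ "]"
    else
      -- for i in range(21): nikobus_address = (nikobus_address << 1) | ((address >> i) & 1)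
      let nikobus_address := (PySem.List.pyRange 0 21 1).foldl
        (fun nik i => PySem.Int.bor (nik <<< (1:Nat)) (PySem.Int.band (address >>> i.toNat) 1)) 0
      let nikobus_address := nikobus_address <<< (1:Nat)
      let button := PySem.Int.band (address >>> (21:Nat)) 0x07
      let final_address := nikobus_address + button
      pyFormat06X final_address

-- ===== PORT B =====
-- _rev8: reverse the 8 bits of a byte with mask-and-shift swaps
def rev8I (b : Int) : Int :=
  let b1 := PySem.Int.bor (PySem.Int.band b 0xF0 >>> (4:Nat)) (PySem.Int.band b 0x0F <<< (4:Nat))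
  let b2 := PySem.Int.bor (PySem.Int.band b1 0xCC >>> (2:Nat)) (PySem.Int.band b1 0x33 <<< (2:Nat))
  PySem.Int.bor (PySem.Int.band b2 0xAA >>> (1:Nat)) (PySem.Int.band b2 0x55 <<< (1:Nat))

def convert_nikobus_address_alt (address_string : String) : String :=
  match PySem.Int.ofStrBase? address_string 16 with
  | none => "[" ++ address_string ++ "]"
  | some address =>
    if address < 0 ∨ address > 0xFFFFFF then "[" ++ address_string ++ "]"
    else
      let low := PySem.Int.band address 0x1FFFFF
      let rev24 := (rev8I (PySem.Int.band low 0xFF) <<< (16:Nat))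
                 + (rev8I (PySem.Int.band (low >>> (8:Nat)) 0xFF) <<< (8:Nat))
                 + rev8I (low >>> (16:Nat))
      let final_address := ((rev24 >>> (3:Nat)) <<< (1:Nat)) + PySem.Int.band (address >>> (21:Nat)) 0x07
      pyFormat06X final_address

-- ===== PRECONDITION & SPEC =====
def Spec_convert_nikobus_address (address_string : String) (out : String) : Prop := out = convert_nikobus_address_alt address_string
instance (address_string : String) (out : String) : Decidable (Spec_convert_nikobus_address address_string out) := by unfold Spec_convert_nikobus_address; infer_instance

-- ===== CLAIM (what is proved, stated in full; the proofs are below) =====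
def Claim_equal_convert_nikobus_address : Prop := ∀ (address_string : String), Dom_convert_nikobus_address address_string → Spec_convert_nikobus_address address_string (convert_nikobus_address address_string)

-- ===== LEMMAS AND PROOFS =====

def rev8N (b : Nat) : Nat :=
  let b1 := ((b &&& 0xF0) >>> 4) ||| ((b &&& 0x0F) <<< 4)
  let b2 := ((b1 &&& 0xCC) >>> 2) ||| ((b1 &&& 0x33) <<< 2)
  ((b2 &&& 0xAA) >>> 1) ||| ((b2 &&& 0x55) <<< 1)

def F (x n : Nat) : Nat := (List.range n).foldl (fun acc i => 2*acc + x >>> i % 2) 0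

lemma castShiftL (m k : Nat) : ((m:Int) <<< k) = ((m <<< k : Nat) : Int) := by simp
lemma castShiftR (m k : Nat) : ((m:Int) >>> k) = ((m >>> k : Nat) : Int) := by simp

lemma rev8I_cast (m : Nat) : rev8I (m : Int) = ((rev8N m : Nat) : Int) := by
  simp only [rev8I, rev8N,
    show (0xF0:Int) = ((0xF0:Nat):Int) from rfl, show (0x0F:Int) = ((0x0F:Nat):Int) from rfl,
    show (0xCC:Int) = ((0xCC:Nat):Int) from rfl, show (0x33:Int) = ((0x33:Nat):Int) from rfl,
    show (0xAA:Int) = ((0xAA:Nat):Int) from rfl, show (0x55:Int) = ((0x55:Nat):Int) from rfl,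
    PySem.Int.band_natCast, castShiftL, castShiftR, PySem.Int.bor_natCast]

lemma F_succ (x n : Nat) : F x (n+1) = 2 * F x n + x >>> n % 2 := by
  simp [F, List.range_succ]

lemma F_split (x m n : Nat) : F x (m + n) = F x m * 2^n + F (x >>> m) n := by
  induction n with
  | zero => simp [F]
  | succ n ih =>
    have h1 : m + (n+1) = (m+n)+1 := rfl
    rw [h1, F_succ, ih, F_succ, Nat.shiftRight_add, pow_succ]
    ring

lemma F_congr (x y n : Nat) (h : ∀ i < n, x >>> i % 2 = y >>> i % 2) : F x n = F y n := by
  induction n with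
  | zero => simp [F]
  | succ n ih =>
    rw [F_succ, F_succ, ih (fun i hi => h i (by omega)), h n (by omega)]

lemma bit_mod_pow (x i n : Nat) (h : i < n) : (x % 2^n) >>> i % 2 = x >>> i % 2 := by
  have e : ∀ y j : Nat, y >>> j % 2 = (Nat.testBit y j).toNat := by
    intro y j; simp [Nat.testBit]
    rcases Nat.mod_two_eq_zero_or_one (y >>> j) with h'|h' <;> simp [h']
  rw [e, e, Nat.testBit_mod_two_pow]
  simp [h]

lemma F_mod (y n : Nat) : F (y % 2^n) n = F y n :=
  F_congr _ _ _ (fun i hi => bit_mod_pow y i n hi)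

set_option maxRecDepth 10000 in
lemma rev8N_byte : ∀ b < 256, F b 8 = rev8N b := by decide

set_option maxRecDepth 10000 in
lemma rev8N_small : ∀ b < 32, rev8N b = 8 * F b 5 := by decide

def revB (x : Nat) : Nat :=
  ((rev8N ((x &&& 0x1FFFFF) &&& 0xFF) <<< 16) +
   (rev8N (((x &&& 0x1FFFFF) >>> 8) &&& 0xFF) <<< 8) +
   rev8N ((x &&& 0x1FFFFF) >>> 16)) >>> 3

lemma revB_eq_F (x : Nat) : revB x = F x 21 := by
  unfold revB
  have hlow : x &&& 0x1FFFFF = x % 2^21 := by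
    have := Nat.and_two_pow_sub_one_eq_mod x 21
    norm_num at this ⊢; omega
  rw [hlow, ← F_mod x 21]
  have hlt : x % 2^21 < 2^21 := Nat.mod_lt _ (by norm_num)
  generalize x % 2^21 = low at hlt ⊢
  have hb0 : low &&& 0xFF = low % 2^8 := by
    have := Nat.and_two_pow_sub_one_eq_mod low 8; norm_num at this ⊢; omega
  have hb1 : (low >>> 8) &&& 0xFF = (low >>> 8) % 2^8 := by
    have := Nat.and_two_pow_sub_one_eq_mod (low >>> 8) 8; norm_num at this ⊢; omega
  have hb2lt : low >>> 16 < 32 := by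
    rw [Nat.shiftRight_eq_div_pow]; omega
  have e0 := rev8N_byte (low % 2^8) (Nat.mod_lt _ (by norm_num))
  have e1 := rev8N_byte ((low >>> 8) % 2^8) (Nat.mod_lt _ (by norm_num))
  have e2 := rev8N_small (low >>> 16) hb2lt
  rw [hb0, hb1, ← e0, ← e1, e2]
  have hsplit : F low 21 = F low 8 * 2^13 + (F (low >>> 8) 8 * 2^5 + F (low >>> 16) 5) := by
    rw [show (21:Nat) = 8 + 13 from rfl, F_split, show (13:Nat) = 8 + 5 from rfl, F_split,
        ← Nat.shiftRight_add]
  rw [hsplit, (F_mod low 8).symm, (F_mod (low >>> 8) 8).symm]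
  rw [Nat.shiftLeft_eq, Nat.shiftLeft_eq, Nat.shiftRight_eq_div_pow]
  norm_num
  omega

lemma or_low (a b : Nat) (h : b < 2) : 2*a ||| b = 2*a + b := by
  interval_cases b
  · simp
  · have h1 : 2*a = Nat.bit false a := by simp [Nat.bit]
    have h2 : (1:Nat) = Nat.bit true 0 := by simp [Nat.bit]
    rw [h1, h2, Nat.lor_bit]
    simp [Nat.bit]

lemma castShiftRI (m k : Nat) : ((m:Int) >>> ((k:Nat) : Int)) = ((m >>> k : Nat) : Int) := by simp

lemma stepCast (x m i : Nat) :
    PySem.Int.bor ((m:Int) <<< (1:Nat)) (PySem.Int.band ((x:Int) >>> ((((i:Int)).toNat : Nat) : Int)) 1)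
      = ((2*m + x >>> i % 2 : Nat) : Int) := by
  rw [Int.toNat_natCast, castShiftL, castShiftRI, show (1:Int) = ((1:Nat):Int) from rfl,
      PySem.Int.band_natCast, PySem.Int.bor_natCast]
  congr 1
  rw [Nat.shiftLeft_eq, pow_one, Nat.and_one_is_mod, mul_comm]
  exact or_low _ _ (Nat.mod_lt _ (by norm_num))

lemma pyRangeEq : PySem.List.pyRange 0 21 1 = (List.range 21).map (Nat.cast : Nat → Int) := by decide

lemma foldA (x : Nat) : ∀ (l : List Nat) (m : Nat),
    (l.map (Nat.cast : Nat → Int)).foldl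
      (fun nik i => PySem.Int.bor (nik <<< (1:Nat)) (PySem.Int.band ((x:Int) >>> i.toNat) 1)) (m:Int)
      = ((l.foldl (fun acc i => 2*acc + x >>> i % 2) m : Nat) : Int) := by
  intro l
  induction l with
  | nil => intro m; simp
  | cons i t ih =>
    intro m
    simp only [List.map_cons, List.foldl_cons]
    rw [stepCast]
    exact ih _

-- ===== VERDICT (by name: the statement is the Claim_ definition above) =====
theorem convert_nikobus_address_spec : Claim_equal_convert_nikobus_address := by
  intro s _
  unfold Spec_convert_nikobus_address convert_nikobus_address convert_nikobus_address_alt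
  cases h : PySem.Int.ofStrBase? s 16 with
  | none => rfl
  | some a =>
    simp only []
    split_ifs with hg
    · rfl
    · have hx : a = ((a.toNat : Nat) : Int) := by omega
      rw [hx]
      congr 1
      congr 1
      rw [pyRangeEq, show (0:Int) = ((0:Nat):Int) from rfl, foldA]
      rw [show (List.range 21).foldl (fun acc i => 2*acc + a.toNat >>> i % 2) 0 = F a.toNat 21 from rfl]
      simp only [show (0x1FFFFF:Int) = ((0x1FFFFF:Nat):Int) from rfl,
        show (0xFF:Int) = ((0xFF:Nat):Int) from rfl,
        PySem.Int.band_natCast, castShiftR, rev8I_cast, castShiftL, ← Nat.cast_add]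
      rw [show (rev8N (a.toNat &&& 0x1FFFFF &&& 0xFF) <<< 16 +
                rev8N ((a.toNat &&& 0x1FFFFF) >>> 8 &&& 0xFF) <<< 8 +
                rev8N ((a.toNat &&& 0x1FFFFF) >>> 16)) >>> 3 = revB a.toNat from rfl, revB_eq_F]
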